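-- pv_equiv track=rewrite | github.com/alextretyak/empireofcode.com-solutions | Speed Boost/Striped Words.py | striped_words
-- ===== SOURCE A (Python) =====
-- VOWELS = "AEIOUY"
--
-- def striped_words(text):
--     n = 0
--     wordlen = 0
--     for c in text:
--         if c.isalnum():
--             if wordlen != -1:
--                 if c.isdigit():
--                     wordlen = -1 # a mix of letters and digits is not a word
--                 elif wordlen == 0:
--                     vowel = c.upper() in VOWELS
--                     wordlen = 1
--                 else:
--                     vowel = not vowel
--                     if vowel != (c.upper() in VOWELS):
--                         wordlen = -1 # word is not striped
--                     else:
--                         wordlen += 1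
--         else:
--             if wordlen > 1: n += 1
--             wordlen = 0
--     if wordlen > 1: n += 1
--     return n
-- ===== SOURCE B (Python) =====
-- VOWELS = "AEIOUY"
--
-- def striped_words(text):
--     # tokenizer + classifier decomposition instead of A's one-pass state machine
--     n = 0
--     i = 0
--     L = len(text)
--     while i < L:
--         if not text[i].isalnum():
--             i += 1
--             continue
--         j = i
--         while j < L and text[j].isalnum():
--             j += 1
--         tok = text[i:j]
--         i = j
--         if len(tok) >= 2 and not any(c.isdigit() for c in tok):
--             flags = [c.upper() in VOWELS for c in tok]
--             if all(flags[k] != flags[k + 1] for k in range(len(flags) - 1)):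
--                 n += 1
--     return n
-- ===== Notes on version B (the rewrite author's own statement) =====
-- stated objective: simpler
-- what changed: Replaces A's single-pass -1-sentinel state machine (wordlen/vowel flags threaded through every character) by a plain tokenizer that cuts the text into maximal alnum runs and a separate classifier that accepts a token iff it has length >= 2, no digit, and strictly alternating vowel flags.
import Mathlib
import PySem

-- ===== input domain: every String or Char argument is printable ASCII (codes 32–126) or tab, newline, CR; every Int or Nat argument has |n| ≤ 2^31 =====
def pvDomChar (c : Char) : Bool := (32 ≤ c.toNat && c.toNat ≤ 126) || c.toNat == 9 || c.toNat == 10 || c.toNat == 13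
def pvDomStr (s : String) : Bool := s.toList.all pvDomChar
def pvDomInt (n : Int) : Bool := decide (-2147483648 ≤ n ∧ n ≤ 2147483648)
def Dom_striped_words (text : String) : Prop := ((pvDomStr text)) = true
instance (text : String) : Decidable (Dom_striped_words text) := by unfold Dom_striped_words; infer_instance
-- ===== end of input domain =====

-- B replaces A's one-pass sentinel state machine by a tokenizer (maximal alnum runs) plus a
-- separate per-token classifier; objective: simpler decomposition, same cost.

-- ===== PORT A =====
-- c.upper() in VOWELS (shared by both ports, as both Pythons use this very test)
def isVowelChar (c : Char) : Bool :=
  PySem.Chars.isIn [PySem.Chars.upperChar c] "AEIOUY".toList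

-- one iteration of A's for-loop; state = (n, wordlen, vowel)
def stripedStep (st : Int × Int × Bool) (c : Char) : Int × Int × Bool :=
  let (n, wordlen, vowel) := st
  if PySem.Chars.isalnum c then
    if wordlen ≠ -1 then
      if PySem.Chars.isdigit c then (n, -1, vowel)
      else if wordlen = 0 then (n, 1, isVowelChar c)
      else
        let v := !vowel
        if v ≠ isVowelChar c then (n, -1, v) else (n, wordlen + 1, v)
    else (n, wordlen, vowel)
  else
    ((if wordlen > 1 then n + 1 else n), 0, vowel)

def striped_words (text : String) : Int :=
  let st := text.toList.foldl stripedStep (0, 0, false)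
  if st.2.1 > 1 then st.1 + 1 else st.1

-- ===== PORT B =====
-- token classifier: length >= 2, no digit, strictly alternating vowel flags
def pvIsWordTok (tok : List Char) : Bool :=
  if 2 ≤ tok.length && !(tok.any PySem.Chars.isdigit) then
    let flags := tok.map isVowelChar
    (flags.zip flags.tail).all (fun p => p.1 != p.2)
  else false

-- the outer while-loop of Source B: skip a non-alnum char, or cut off one maximal alnum run
def bLoop : List Char → Int
  | [] => 0
  | c :: rest =>
    if PySem.Chars.isalnum c then
      (if pvIsWordTok (c :: rest.takeWhile PySem.Chars.isalnum) then 1 else 0)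
        + bLoop (rest.dropWhile PySem.Chars.isalnum)
    else bLoop rest
termination_by l => l.length
decreasing_by
  · exact Nat.lt_succ_of_le (List.length_dropWhile_le _ _)
  · simp

def striped_words_alt (text : String) : Int := bLoop text.toList

-- ===== PRECONDITION & SPEC =====
def Spec_striped_words (text : String) (out : Int) : Prop := out = striped_words_alt text
instance (text : String) (out : Int) : Decidable (Spec_striped_words text out) := by unfold Spec_striped_words; infer_instance

-- ===== CLAIM (what is proved, stated in full; the proofs are below) =====
def Claim_equal_striped_words : Prop := ∀ (text : String), Dom_striped_words text → Spec_striped_words text (striped_words text)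

-- ===== LEMMAS AND PROOFS =====

-- A's final accounting step, as a function of the loop state
def finA (st : Int × Int × Bool) : Int := if st.2.1 > 1 then st.1 + 1 else st.1

-- A's mid-word behaviour (wordlen ≥ 1) on a run of alnum chars, as a little machine
def midRun (k : Int) (v : Bool) : List Char → Int × Bool
  | [] => (k, v)
  | c :: cs =>
    if PySem.Chars.isdigit c then (-1, v)
    else if (!v) ≠ isVowelChar c then (-1, !v)
    else midRun (k + 1) (!v) cs

-- strict alternation of vowel flags starting after flag v
def chainAlt (v : Bool) : List Char → Bool
  | [] => true
  | c :: cs => (isVowelChar c == !v) && chainAlt (!v) cs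

theorem foldl_dead (tok : List Char) (h : tok.all PySem.Chars.isalnum = true)
    (n : Int) (v : Bool) : tok.foldl stripedStep (n, -1, v) = (n, -1, v) := by
  induction tok with
  | nil => rfl
  | cons c cs ih =>
    simp only [List.all_cons, Bool.and_eq_true] at h
    simp [List.foldl_cons, stripedStep, h.1, ih h.2]

theorem foldl_mid (tok : List Char) (h : tok.all PySem.Chars.isalnum = true) :
    ∀ (n k : Int) (v : Bool), 1 ≤ k →
    tok.foldl stripedStep (n, k, v) = (n, (midRun k v tok).1, (midRun k v tok).2) := by
  induction tok with
  | nil => intro n k v _; rfl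
  | cons c cs ih =>
    intro n k v hk
    simp only [List.all_cons, Bool.and_eq_true] at h
    have hk0 : k ≠ -1 := by omega
    have hk1 : k ≠ 0 := by omega
    by_cases hd : PySem.Chars.isdigit c = true
    · simp [List.foldl_cons, stripedStep, h.1, hd, hk0, midRun,
        foldl_dead cs h.2]
    · by_cases hv : (!v) = isVowelChar c
      · have h1 : midRun k v (c :: cs) = midRun (k + 1) (!v) cs := by
          simp [midRun, hd, hv]
        have hstep : stripedStep (n, k, v) c = (n, k + 1, !v) := by
          simp [stripedStep, h.1, hd, hk0, hk1, hv]
        rw [List.foldl_cons, h1, hstep, ih h.2 n (k + 1) (!v) (by omega)]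
      · simp [List.foldl_cons, stripedStep, h.1, hd, hk0, hk1, midRun, hv,
          foldl_dead cs h.2]

theorem midRun_char (tok : List Char) : ∀ (k : Int) (v : Bool),
    (midRun k v tok).1 =
      if !(tok.any PySem.Chars.isdigit) && chainAlt v tok then k + tok.length else -1 := by
  induction tok with
  | nil => intro k v; simp [midRun, chainAlt]
  | cons c cs ih =>
    intro k v
    by_cases hd : PySem.Chars.isdigit c = true
    · simp [midRun, chainAlt, hd]
    · by_cases hv : (!v) = isVowelChar c
      · have h1 : midRun k v (c :: cs) = midRun (k + 1) (!v) cs := by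
          simp [midRun, hd, hv]
        have h2 : chainAlt v (c :: cs) = chainAlt (!v) cs := by
          simp [chainAlt, ← hv]
        rw [h1, ih (k + 1) (!v), h2]
        have h3 : (c :: cs).any PySem.Chars.isdigit = cs.any PySem.Chars.isdigit := by
          simp [hd]
        rw [h3]
        split_ifs with h4
        · simp [List.length_cons]; ring
        · rfl
      · have hbeq : (isVowelChar c == !v) = false := by
          cases h3 : isVowelChar c <;> cases v <;> simp_all
        have h1 : midRun k v (c :: cs) = (-1, !v) := by
          simp [midRun, hd, hv]
        have h2 : chainAlt v (c :: cs) = false := by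
          simp [chainAlt, hbeq]
        rw [h1, h2]
        simp

theorem zip_flags (cs : List Char) : ∀ (b : Bool),
    ((b :: cs.map isVowelChar).zip (cs.map isVowelChar)).all (fun p => p.1 != p.2)
      = chainAlt b cs := by
  induction cs with
  | nil => intro b; rfl
  | cons c cs ih =>
    intro b
    simp only [List.map_cons, List.zip_cons_cons, List.all_cons, chainAlt, ih]
    cases hb : isVowelChar c <;> cases b <;> simp_all

theorem inc_lem (c : Char) (tw : List Char) (hc : PySem.Chars.isalnum c = true)
    (h : tw.all PySem.Chars.isalnum = true) (n : Int) (v : Bool) :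
    (tw.foldl stripedStep (stripedStep (n, 0, v) c)).1 = n ∧
    (((tw.foldl stripedStep (stripedStep (n, 0, v) c)).2.1 > 1) ↔
      pvIsWordTok (c :: tw) = true) := by
  by_cases hd : PySem.Chars.isdigit c = true
  · have : stripedStep (n, 0, v) c = (n, -1, v) := by simp [stripedStep, hc, hd]
    rw [this, foldl_dead tw h]
    refine ⟨rfl, ?_⟩
    simp [pvIsWordTok, hd]
  · have : stripedStep (n, 0, v) c = (n, 1, isVowelChar c) := by
      simp [stripedStep, hc, hd]
    rw [this, foldl_mid tw h n 1 (isVowelChar c) le_rfl]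
    refine ⟨rfl, ?_⟩
    rw [midRun_char]
    simp only [pvIsWordTok, List.map_cons]
    rw [List.tail_cons, zip_flags tw (isVowelChar c)]
    by_cases hdg : tw.any PySem.Chars.isdigit = true
    · simp [hdg, List.any_cons, hd]
    · by_cases hch : chainAlt (isVowelChar c) tw = true
      · simp only [hdg, hch, Bool.not_false, Bool.and_true, if_true,
          List.any_cons, hd, List.length_cons]
        simp
        constructor
        · intro hl
          have : 1 ≤ tw.length := by omega
          omega
        · intro hl; omega
      · simp [hdg, hch]

theorem head_dropWhile {p : Char → Bool} {l : List Char} {d : Char} {dl : List Char}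
    (h : l.dropWhile p = d :: dl) : p d = false := by
  have := List.head?_dropWhile_not p l
  rw [h] at this
  simpa using this

theorem main_lem (cs : List Char) : ∀ (n : Int) (v : Bool),
    finA (cs.foldl stripedStep (n, 0, v)) = n + bLoop cs := by
  match cs with
  | [] => intro n v; simp [finA, bLoop]
  | c :: rest =>
    intro n v
    by_cases hc : PySem.Chars.isalnum c = true
    · have hsplit : rest = rest.takeWhile PySem.Chars.isalnum
          ++ rest.dropWhile PySem.Chars.isalnum := (List.takeWhile_append_dropWhile).symm
      have htw : (rest.takeWhile PySem.Chars.isalnum).all PySem.Chars.isalnum = true := by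
        rw [List.all_eq_true]; intro x hx
        exact List.mem_takeWhile_imp hx
      have key := inc_lem c (rest.takeWhile PySem.Chars.isalnum) hc htw n v
      rw [List.foldl_cons]
      conv_lhs => rw [hsplit]
      rw [List.foldl_append]
      set st1 := (rest.takeWhile PySem.Chars.isalnum).foldl stripedStep
        (stripedStep (n, 0, v) c) with hst1
      rcases hdw : rest.dropWhile PySem.Chars.isalnum with _ | ⟨d, dl⟩
      · -- run reaches end of text
        rw [List.foldl_nil]
        rw [bLoop]
        simp only [hc, if_true, hdw, bLoop]
        unfold finA
        rcases key with ⟨k1, k2⟩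
        by_cases hw : pvIsWordTok (c :: rest.takeWhile PySem.Chars.isalnum) = true
        · rw [if_pos (k2.mpr hw), k1, if_pos hw]; ring
        · rw [if_neg (fun hgt => hw (k2.mp hgt)), k1, if_neg hw]; ring
      · -- run followed by a non-alnum char
        have hd : PySem.Chars.isalnum d = false := head_dropWhile hdw
        rcases key with ⟨k1, k2⟩
        rw [List.foldl_cons]
        have hstep : stripedStep st1 d =
            ((if pvIsWordTok (c :: rest.takeWhile PySem.Chars.isalnum) then st1.1 + 1
              else st1.1), 0, st1.2.2) := by
          show stripedStep (st1.1, st1.2.1, st1.2.2) d = _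
          simp only [stripedStep, hd, Bool.false_eq_true, if_false]
          congr 1
          by_cases hw : pvIsWordTok (c :: rest.takeWhile PySem.Chars.isalnum) = true
          · rw [if_pos (k2.mpr hw), if_pos hw]
          · rw [if_neg (fun hgt => hw (k2.mp hgt)), if_neg hw]
        rw [hstep]
        rw [main_lem dl _ st1.2.2]
        rw [bLoop]
        simp only [hc, if_true, hdw, bLoop, hd, Bool.false_eq_true, if_false]
        by_cases hw : pvIsWordTok (c :: rest.takeWhile PySem.Chars.isalnum) = true
        · rw [if_pos hw, if_pos hw, k1]; ring
        · rw [if_neg hw, if_neg hw, k1]; ring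
    · rw [List.foldl_cons]
      have : stripedStep (n, 0, v) c = (n, 0, v) := by simp [stripedStep, hc]
      rw [this, main_lem rest n v, bLoop]
      simp [hc]
termination_by cs.length
decreasing_by
  · have h1 : (rest.dropWhile PySem.Chars.isalnum).length ≤ rest.length :=
      List.length_dropWhile_le _ _
    rw [hdw] at h1
    simp at h1 ⊢
    omega
  · simp

-- ===== VERDICT (by name: the statement is the Claim_ definition above) =====
theorem striped_words_spec : Claim_equal_striped_words := by
  intro text _
  unfold Spec_striped_words striped_words striped_words_alt
  simpa [finA] using main_lem text.toList 0 false
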